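-- pv_equiv track=rewrite | github.com/dcosmic/thinkcspy3 | ch07/07.05-sum_except_first_even_numbers.py | sum_except_first_even_numbers
-- ===== SOURCE A (Python) =====
-- def sum_except_first_even_numbers(num_list):
--     sum = 0
--     counter = 1
--     for i in num_list:
--         if isinstance(i, int):
--             if i % 2 == 0 and counter != 0:
--                 counter -= 1
--             else:
--                 sum += i
--     return sum
-- ===== SOURCE B (Python) =====
-- def sum_except_first_even_numbers(num_list):
--     total = sum(i for i in num_list if isinstance(i, int))
--     for i in num_list:
--         if isinstance(i, int) and i % 2 == 0:
--             return total - i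
--     return total
-- ===== Notes on version B (the rewrite author's own statement) =====
-- stated objective: simpler
-- what changed: Replaces A's single stateful skip-counter loop with a sum-everything-then-subtract-the-first-even-element decomposition (total sum, then one scan for the first even int).
import Mathlib
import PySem

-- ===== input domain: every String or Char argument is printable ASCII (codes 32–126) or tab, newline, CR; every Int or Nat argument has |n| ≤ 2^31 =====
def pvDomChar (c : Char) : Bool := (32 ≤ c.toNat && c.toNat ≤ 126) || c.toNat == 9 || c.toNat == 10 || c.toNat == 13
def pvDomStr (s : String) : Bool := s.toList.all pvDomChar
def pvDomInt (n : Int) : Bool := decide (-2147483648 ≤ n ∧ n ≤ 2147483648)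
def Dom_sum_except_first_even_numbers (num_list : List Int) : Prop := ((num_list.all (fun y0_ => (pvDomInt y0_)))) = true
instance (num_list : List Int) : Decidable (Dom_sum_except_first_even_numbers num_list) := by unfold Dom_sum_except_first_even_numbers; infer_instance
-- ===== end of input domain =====

-- B replaces A's stateful skip-counter loop by summing everything and subtracting the first even element (simpler decomposition).

-- ===== PORT A =====
-- A's loop, with the running sum and the skip counter as explicit state
def pvLoopA : List Int → Int → Int → Int
  | [], s, _ => s
  | i :: t, s, c => if i % 2 == 0 && c != 0 then pvLoopA t s (c - 1) else pvLoopA t (s + i) c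

def sum_except_first_even_numbers (num_list : List Int) : Int :=
  pvLoopA num_list 0 1

-- ===== PORT B =====
def sum_except_first_even_numbers_alt (num_list : List Int) : Int :=
  let total := num_list.sum
  match num_list.find? (fun i => i % 2 == 0) with
  | some i => total - i
  | none => total

-- ===== PRECONDITION & SPEC =====
def Spec_sum_except_first_even_numbers (num_list : List Int) (out : Int) : Prop := out = sum_except_first_even_numbers_alt num_list
instance (num_list : List Int) (out : Int) : Decidable (Spec_sum_except_first_even_numbers num_list out) := by unfold Spec_sum_except_first_even_numbers; infer_instance

-- ===== CLAIM (what is proved, stated in full; the proofs are below) =====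
def Claim_equal_sum_except_first_even_numbers : Prop := ∀ (num_list : List Int), Dom_sum_except_first_even_numbers num_list → Spec_sum_except_first_even_numbers num_list (sum_except_first_even_numbers num_list)

-- ===== LEMMAS AND PROOFS =====

-- once the counter has reached 0, A's loop just adds everything
theorem pvLoopA_zero (l : List Int) (s : Int) : pvLoopA l s 0 = s + l.sum := by
  induction l generalizing s with
  | nil => simp [pvLoopA]
  | cons i t ih => simp [pvLoopA, ih, List.sum_cons]; ring

-- with counter 1, A's loop computes B's value shifted by the accumulator
theorem pvLoopA_one (l : List Int) (s : Int) :
    pvLoopA l s 1 = s + sum_except_first_even_numbers_alt l := by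
  induction l generalizing s with
  | nil => simp [pvLoopA, sum_except_first_even_numbers_alt]
  | cons i t ih =>
    by_cases h : i % 2 = 0
    · simp [pvLoopA, h, pvLoopA_zero, sum_except_first_even_numbers_alt, List.find?, List.sum_cons]
    · have h' : (i % 2 == 0) = false := by simp [h]
      simp [pvLoopA, h', ih, sum_except_first_even_numbers_alt, List.find?, List.sum_cons]
      cases hf : t.find? (fun i => i % 2 == 0) <;> simp [hf] <;> try ring

-- ===== VERDICT (by name: the statement is the Claim_ definition above) =====
theorem sum_except_first_even_numbers_spec : Claim_equal_sum_except_first_even_numbers := by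
  intro l _
  unfold Spec_sum_except_first_even_numbers sum_except_first_even_numbers
  simpa using pvLoopA_one l 0
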